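-- pv_equiv track=rewrite | github.com/ProjectLozhka/Parser | main.py | cut_url_2
-- ===== SOURCE A (Python) =====
-- def cut_url_2(url, x):
--     new_url = ''
--     n = 0
--     m = 0
--     for letter in url:
--         if letter == '/':
--             n += 1
--         if n >= 5:
--             m += 1
--             if m >= x:
--                 new_url = new_url.replace('list', 'year')
--                 return new_url
--         new_url += letter
--     new_url = new_url.replace('list', 'year')
--     return new_url
-- ===== SOURCE B (Python) =====
-- def cut_url_2(url, x):
--     slashes = [i for i, c in enumerate(url) if c == '/']
--     if len(slashes) < 5:
--         s = url
--     else: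
--         s = url[:slashes[4] + max(x - 1, 0)]
--     return s.replace('list', 'year')
-- ===== Notes on version B (the rewrite author's own statement) =====
-- stated objective: simpler
-- what changed: B locates the 5th '/' once via an enumerate-based position list and slices url[:p + max(x-1, 0)] (whole url if fewer than 5 slashes), instead of A's char-by-char loop accumulating a string with two running counters and an early return.
import Mathlib
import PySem

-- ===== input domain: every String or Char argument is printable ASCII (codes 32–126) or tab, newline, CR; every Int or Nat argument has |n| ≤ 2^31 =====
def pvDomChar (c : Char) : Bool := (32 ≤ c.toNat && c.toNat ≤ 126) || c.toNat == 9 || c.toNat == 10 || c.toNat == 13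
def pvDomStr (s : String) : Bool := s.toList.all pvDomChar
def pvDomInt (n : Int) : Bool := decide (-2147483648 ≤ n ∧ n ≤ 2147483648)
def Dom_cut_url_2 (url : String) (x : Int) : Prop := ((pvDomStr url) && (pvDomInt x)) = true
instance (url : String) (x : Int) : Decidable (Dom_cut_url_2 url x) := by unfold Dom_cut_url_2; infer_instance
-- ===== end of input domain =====

-- B replaces A's char-by-char loop with two running counters by finding the index of the
-- 5th '/' up front and slicing once (objective: simpler; same asymptotic cost).

-- ===== PORT A =====
-- the for-loop of A: state = (new_url, n, m); both exits apply .replace('list','year')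
def cut_url_2_go (x : Int) : List Char → List Char → Int → Int → String
  | [], new_url, _, _ => PySem.Str.replace (String.ofList new_url) "list" "year"
  | letter :: rest, new_url, n, m =>
    let n := if letter = '/' then n + 1 else n
    if 5 ≤ n then
      let m := m + 1
      if x ≤ m then PySem.Str.replace (String.ofList new_url) "list" "year"
      else cut_url_2_go x rest (new_url ++ [letter]) n m
    else cut_url_2_go x rest (new_url ++ [letter]) n m

def cut_url_2 (url : String) (x : Int) : String :=
  cut_url_2_go x url.toList [] 0 0

-- ===== PORT B =====
def cut_url_2_alt (url : String) (x : Int) : String :=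
  let slashes := ((PySem.List.enumerate url.toList 0).filter (fun p => p.2 = '/')).map (fun p => p.1)
  let s : List Char :=
    if slashes.length < 5 then url.toList
    else PySem.List.slice url.toList none (some (slashes.getD 4 0 + max (x - 1) 0))  -- url[:k], k ≥ 0
  PySem.Str.replace (String.ofList s) "list" "year"

-- ===== PRECONDITION & SPEC =====
def Spec_cut_url_2 (url : String) (x : Int) (out : String) : Prop := out = cut_url_2_alt url x
instance (url : String) (x : Int) (out : String) : Decidable (Spec_cut_url_2 url x out) := by unfold Spec_cut_url_2; infer_instance

-- ===== CLAIM (what is proved, stated in full; the proofs are below) =====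
def Claim_equal_cut_url_2 : Prop := ∀ (url : String) (x : Int), Dom_cut_url_2 url x → Spec_cut_url_2 url x (cut_url_2 url x)

-- ===== LEMMAS AND PROOFS =====

-- index (0-based among slashes) of the (k+1)-th '/' in l, if any
def sidx : List Char → Nat → Option Nat
  | [], _ => none
  | c :: rest, k =>
    if c = '/' then
      (if k = 0 then some 0 else (sidx rest (k - 1)).map (· + 1))
    else (sidx rest k).map (· + 1)

-- the common value: prefix of l kept, as a function of the position of the (k+1)-th slash
def keep (x : Int) (l : List Char) (k : Nat) : List Char :=
  match sidx l k with
  | none => l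
  | some p => l.take (p + (x - 1).toNat)

theorem phase2 (x : Int) (l : List Char) : ∀ (acc : List Char) (n m : Int), 5 ≤ n →
    cut_url_2_go x l acc n m =
      PySem.Str.replace (String.ofList (acc ++ l.take (x - 1 - m).toNat)) "list" "year" := by
  induction l with
  | nil => intro acc n m _; simp [cut_url_2_go]
  | cons c l ih =>
    intro acc n m hn
    have hn' : 5 ≤ (if c = '/' then n + 1 else n) := by split <;> omega
    simp only [cut_url_2_go]
    rw [if_pos hn']
    by_cases hx : x ≤ m + 1
    · rw [if_pos hx]
      have h0 : (x - 1 - m).toNat = 0 := by omega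
      rw [h0]; simp
    · rw [if_neg hx, ih (acc ++ [c]) _ (m + 1) hn']
      have h1 : (x - 1 - m).toNat = (x - 1 - (m + 1)).toNat + 1 := by omega
      rw [h1, List.take_succ_cons]; simp

theorem keep_cons_noslash (x : Int) (c : Char) (l : List Char) (k : Nat) (hc : ¬ c = '/') :
    keep x (c :: l) k = c :: keep x l k := by
  simp only [keep, sidx, if_neg hc]
  cases hs : sidx l k with
  | none => simp
  | some p =>
    simp only [Option.map_some]
    rw [show p + 1 + (x - 1).toNat = (p + (x - 1).toNat) + 1 from by omega, List.take_succ_cons]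

theorem keep_cons_slash (x : Int) (l : List Char) (k : Nat) (hk : k ≠ 0) :
    keep x ('/' :: l) k = '/' :: keep x l (k - 1) := by
  simp only [keep, sidx, eq_self_iff_true, if_true, if_neg hk]
  cases hs : sidx l (k - 1) with
  | none => simp
  | some p =>
    simp only [Option.map_some]
    rw [show p + 1 + (x - 1).toNat = (p + (x - 1).toNat) + 1 from by omega, List.take_succ_cons]

theorem phase1 (x : Int) (l : List Char) : ∀ (acc : List Char) (n : Int), 0 ≤ n → n < 5 →
    cut_url_2_go x l acc n 0 =
      PySem.Str.replace (String.ofList (acc ++ keep x l (4 - n.toNat))) "list" "year" := by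
  induction l with
  | nil => intro acc n _ _; simp [cut_url_2_go, keep, sidx]
  | cons c l ih =>
    intro acc n h0 h5
    by_cases hc : c = '/'
    · subst hc
      by_cases hlast : n = 4
      · subst hlast
        simp only [cut_url_2_go, eq_self_iff_true, if_true]
        rw [if_pos (by omega : (5:Int) ≤ 4 + 1)]
        by_cases hx : x ≤ 0 + 1
        · rw [if_pos hx]
          have h1 : (x - 1).toNat = 0 := by omega
          simp [keep, sidx, h1]
        · rw [if_neg hx, phase2 x l (acc ++ ['/']) (4 + 1) (0 + 1) (by omega)]
          have h1 : (0:Nat) + (x - 1).toNat = (x - 1 - (0 + 1)).toNat + 1 := by omega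
          simp [keep, sidx, show ((4:Int).toNat) = 4 from rfl, h1, List.take_succ_cons,
            List.append_assoc]
          conv_rhs => rw [show x.toNat - 1 = (x.toNat - 1 - 1) + 1 from by omega]
          rw [List.take_succ_cons]
      · have hlt : n + 1 < 5 := by omega
        simp only [cut_url_2_go, eq_self_iff_true, if_true]
        rw [if_neg (by omega : ¬ (5:Int) ≤ n + 1), ih (acc ++ ['/']) (n + 1) (by omega) hlt,
          keep_cons_slash x l (4 - n.toNat) (by omega)]
        rw [show 4 - n.toNat - 1 = 4 - (n + 1).toNat from by omega]
        simp
    · simp only [cut_url_2_go, if_neg hc]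
      rw [if_neg (by omega : ¬ (5:Int) ≤ n), ih (acc ++ [c]) n h0 h5, keep_cons_noslash x c l _ hc]
      simp

-- B's slash-position list, related to sidx
theorem slist_getElem? (l : List Char) (s : Int) (k : Nat) :
    (((PySem.List.enumerate l s).filter (fun p => p.2 = '/')).map (fun p => p.1))[k]? =
      (sidx l k).map (fun p => s + (p : Int)) := by
  induction l generalizing s k with
  | nil => simp [PySem.List.enumerate, sidx]
  | cons c l ih =>
    rw [PySem.List.enumerate_cons]
    by_cases hc : c = '/'
    · subst hc
      cases k with
      | zero => simp [sidx]
      | succ k =>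
        have hsidx : sidx ('/' :: l) (k + 1) = (sidx l k).map (· + 1) := by
          simp [sidx]
        rw [hsidx]
        simp only [List.filter_cons, decide_true, if_true, List.map_cons,
          List.getElem?_cons_succ, ih]
        cases sidx l k with
        | none => rfl
        | some p => simp; ring
    · simp only [List.filter_cons, decide_eq_true_eq, if_neg hc, ih, sidx, if_neg hc]
      cases sidx l k with
      | none => simp
      | some p => simp; ring

theorem cut_url_2_alt_eq (url : String) (x : Int) :
    cut_url_2_alt url x =
      PySem.Str.replace (String.ofList (keep x url.toList 4)) "list" "year" := by
  have h := slist_getElem? url.toList 0 4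
  set sl := ((PySem.List.enumerate url.toList 0).filter (fun p => p.2 = '/')).map (fun p => p.1) with hsl
  show PySem.Str.replace (String.ofList
      (if sl.length < 5 then url.toList
       else PySem.List.slice url.toList none (some (sl.getD 4 0 + max (x - 1) 0)))) "list" "year" = _
  cases hs : sidx url.toList 4 with
  | none =>
    have hnone : sl[4]? = none := by rw [h, hs]; rfl
    have hlt : sl.length < 5 := by
      have := List.getElem?_eq_none_iff.mp hnone; omega
    simp [keep, hs, hlt]
  | some p =>
    have hsome : sl[4]? = some ((p : Int)) := by rw [h, hs]; simp
    have hlen : ¬ sl.length < 5 := by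
      by_contra hcon
      rw [List.getElem?_eq_none (by omega)] at hsome; cases hsome
    have hgetD : sl.getD 4 0 = (p : Int) := by simp [List.getD, hsome]
    rw [if_neg hlen, hgetD]
    have hb : (p : Int) + max (x - 1) 0 = ((p + (x - 1).toNat : Nat) : Int) := by
      push_cast; omega
    rw [hb, PySem.List.slice_to_natCast, keep, hs]

-- ===== VERDICT (by name: the statement is the Claim_ definition above) =====
theorem cut_url_2_spec : Claim_equal_cut_url_2 := by
  intro url x _
  show cut_url_2 url x = cut_url_2_alt url x
  rw [cut_url_2_alt_eq]
  have := phase1 x url.toList [] 0 (by omega) (by omega)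
  simpa using this
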